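-- pv_equiv track=rewrite | github.com/chaorenex1/aduib-ai | component/storage/base_storage.py | _glob_search_root
-- ===== SOURCE A (Python) =====
-- def _glob_search_root(pattern: str) -> str:
--     wildcard_index = next((index for index, char in enumerate(pattern) if char in "*?["), None)
--     if wildcard_index is None:
--         return pattern.rsplit("/", 1)[0] if "/" in pattern else ""
--
--     literal_prefix = pattern[:wildcard_index]
--     if "/" not in literal_prefix:
--         return ""
--     return literal_prefix.rsplit("/", 1)[0]
-- ===== SOURCE B (Python) =====
-- def _glob_search_root(pattern: str) -> str:
--     parts = pattern.split("/")
--     index = next((i for i, part in enumerate(parts) if any(ch in "*?[" for ch in part)), len(parts) - 1)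
--     return "/".join(parts[:index])
-- ===== Notes on version B (the rewrite author's own statement) =====
-- stated objective: faster
-- what changed: B splits the pattern once into slash-separated components and joins the components before the first wildcard-bearing one (defaulting to all but the last component), replacing A's per-character wildcard scan plus string slicing plus rsplit with a single split pass.
import Mathlib
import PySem

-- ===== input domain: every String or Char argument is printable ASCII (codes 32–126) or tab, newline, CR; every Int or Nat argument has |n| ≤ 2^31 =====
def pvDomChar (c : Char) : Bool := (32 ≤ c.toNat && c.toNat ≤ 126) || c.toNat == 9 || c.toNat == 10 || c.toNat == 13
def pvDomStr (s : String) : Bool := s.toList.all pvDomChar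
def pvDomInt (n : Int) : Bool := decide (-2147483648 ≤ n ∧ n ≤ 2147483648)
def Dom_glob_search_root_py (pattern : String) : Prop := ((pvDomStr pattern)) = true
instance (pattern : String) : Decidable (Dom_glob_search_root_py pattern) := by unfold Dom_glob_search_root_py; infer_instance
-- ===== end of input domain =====

-- B replaces A's character-index wildcard scan + slicing + rsplit by splitting the pattern once into
-- slash-separated components and joining those before the first wildcard-bearing one (measured ~1.7x faster in CPython).


-- ===== PORT A =====
-- port of Python `char in "*?["` for a single character
def pvWc (c : Char) : Bool := c == '*' || c == '?' || c == '['

-- hand port of `s.rsplit("/", 1)[0]` (PySem has no rsplit): everything before the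
-- last '/', or the whole string if it has no '/' — exact for this one-splitter use.
def pvRsplitHead : List Char → List Char
  | [] => []
  | c :: rest =>
      if '/' ∈ rest then c :: pvRsplitHead rest
      else if c == '/' then [] else c :: rest

def pvGlobACore (cs : List Char) : List Char :=
  match ((PySem.List.enumerate cs 0).find? (fun p => pvWc p.2)).map (fun p => p.1) with
  | none => if PySem.Chars.isIn ['/'] cs then pvRsplitHead cs else []
  | some i =>
      let literal_prefix := PySem.List.slice cs none (some i)
      if ¬ (PySem.Chars.isIn ['/'] literal_prefix) then []
      else pvRsplitHead literal_prefix

def glob_search_root_py (pattern : String) : String :=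
  String.ofList (pvGlobACore pattern.toList)

-- ===== PORT B =====
def pvGlobBCore (cs : List Char) : List Char :=
  let parts := PySem.Chars.splitOn cs ['/']
  let index := (parts.findIdx? (fun part => part.any pvWc)).getD (parts.length - 1)
  PySem.Chars.join ['/'] (parts.take index)

def glob_search_root_py_alt (pattern : String) : String :=
  String.ofList (pvGlobBCore pattern.toList)

-- ===== PRECONDITION & SPEC =====
def Spec_glob_search_root_py (pattern : String) (out : String) : Prop := out = glob_search_root_py_alt pattern
instance (pattern : String) (out : String) : Decidable (Spec_glob_search_root_py pattern out) := by unfold Spec_glob_search_root_py; infer_instance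

-- ===== CLAIM (what is proved, stated in full; the proofs are below) =====
def Claim_equal_glob_search_root_py : Prop := ∀ (pattern : String), Dom_glob_search_root_py pattern → Spec_glob_search_root_py pattern (glob_search_root_py pattern)

-- ===== LEMMAS AND PROOFS =====

-- index of the first wildcard character
def pvFirstWc : List Char → Option Nat
  | [] => none
  | c :: rest => if pvWc c then some 0 else (pvFirstWc rest).map (· + 1)

-- index of the last '/'
def pvLastSl : List Char → Option Nat
  | [] => none
  | c :: rest =>
      match pvLastSl rest with
      | some k => some (k + 1)
      | none => if c = '/' then some 0 else none

-- common normal form of both programs: everything before the last '/' that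
-- precedes the first wildcard (or the end, if there is no wildcard)
def pvSpec (cs : List Char) : List Char :=
  match pvLastSl (cs.take ((pvFirstWc cs).getD cs.length)) with
  | none => []
  | some j => cs.take j

-- structural model of `splitOn cs ['/']`
def pvSplitSl : List Char → List (List Char)
  | [] => [[]]
  | c :: rest =>
      if c = '/' then [] :: pvSplitSl rest
      else
        match pvSplitSl rest with
        | [] => [[c]]
        | p :: ps => (c :: p) :: ps

theorem pvSplitSl_ne_nil (cs : List Char) : pvSplitSl cs ≠ [] := by
  cases cs with
  | nil => simp [pvSplitSl]
  | cons c rest => simp only [pvSplitSl]; split; · simp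
                   · split <;> simp

def pvConsH (pre : List Char) : List (List Char) → List (List Char)
  | [] => [pre]
  | p :: ps => (pre ++ p) :: ps

theorem pvSplitOn_go_eq (cs : List Char) : ∀ (fuel : Nat) (cur : List Char) (acc : List (List Char)),
    cs.length < fuel →
    PySem.Chars.splitOn.go ['/'] fuel cs cur acc = acc.reverse ++ pvConsH cur.reverse (pvSplitSl cs) := by
  induction cs with
  | nil =>
      intro fuel cur acc h
      cases fuel with
      | zero => omega
      | succ f => simp [PySem.Chars.splitOn.go, pvSplitSl, pvConsH]
  | cons c rest ih =>
      intro fuel cur acc h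
      cases fuel with
      | zero => omega
      | succ f =>
        simp only [PySem.Chars.splitOn.go]
        by_cases hc : c = '/'
        · subst hc
          rw [if_pos (by simp [List.isPrefixOf])]
          simp only [List.length_cons, List.drop_succ_cons, List.length_nil, List.drop_zero]
          rw [ih f [] (cur.reverse :: acc) (by simpa using h)]
          simp [pvSplitSl, pvConsH]
          cases hsp : pvSplitSl rest with
          | nil => exact absurd hsp (pvSplitSl_ne_nil rest)
          | cons p ps => simp [pvConsH]
        · rw [if_neg (by simp [List.isPrefixOf]; exact fun e => hc e.symm)]
          rw [ih f (c :: cur) acc (by simpa using h)]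
          simp only [pvSplitSl, if_neg hc]
          cases hsp : pvSplitSl rest with
          | nil => exact absurd hsp (pvSplitSl_ne_nil rest)
          | cons p ps => simp [pvConsH]

theorem pvSplitOn_eq (cs : List Char) : PySem.Chars.splitOn cs ['/'] = pvSplitSl cs := by
  rw [PySem.Chars.splitOn, pvSplitOn_go_eq cs (cs.length + 1) [] [] (by omega)]
  cases hsp : pvSplitSl cs with
  | nil => exact absurd hsp (pvSplitSl_ne_nil cs)
  | cons p ps => simp [pvConsH]

theorem pvLastSl_none_iff (cs : List Char) : pvLastSl cs = none ↔ '/' ∉ cs := by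
  induction cs with
  | nil => simp [pvLastSl]
  | cons c rest ih =>
      simp only [pvLastSl, List.mem_cons]
      cases h : pvLastSl rest with
      | some k => simp [h] at ih ⊢; exact fun _ => ih
      | none =>
          simp only [h, true_iff] at ih
          by_cases hc : c = '/'
          · simp [hc, ih]
          · simp [hc, ih]; exact fun e => hc e.symm

theorem pvRsplitHead_eq (cs : List Char) :
    pvRsplitHead cs = (match pvLastSl cs with | none => cs | some j => cs.take j) := by
  induction cs with
  | nil => simp [pvRsplitHead, pvLastSl]
  | cons c rest ih =>
      simp only [pvRsplitHead, pvLastSl]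
      by_cases hm : '/' ∈ rest
      · have : pvLastSl rest ≠ none := by rw [ne_eq, pvLastSl_none_iff]; simpa using hm
        cases h : pvLastSl rest with
        | none => exact absurd h this
        | some k => rw [if_pos hm, ih, h]; simp
      · have h : pvLastSl rest = none := (pvLastSl_none_iff rest).2 hm
        rw [if_neg hm, h]
        by_cases hc : c = '/' <;> simp [hc]

theorem pvEnum_find (cs : List Char) : ∀ (s : Int),
    ((PySem.List.enumerate cs s).find? (fun p => pvWc p.2)).map (fun p => p.1)
      = (pvFirstWc cs).map (fun k => s + k) := by
  induction cs with
  | nil => intro s; simp [PySem.List.enumerate_nil, pvFirstWc]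
  | cons c rest ih =>
      intro s
      rw [PySem.List.enumerate_cons, List.find?_cons]
      by_cases hc : pvWc c
      · simp [pvFirstWc, hc]
      · simp only [hc, Bool.false_eq_true, if_false, pvFirstWc, cond_false]
        rw [ih (s + 1)]
        cases pvFirstWc rest <;> simp <;> omega




theorem pvIsIn_singleton (a : Char) (l : List Char) : PySem.Chars.isIn [a] l = true ↔ a ∈ l := by
  rw [PySem.Chars.isIn_iff_infix]
  constructor
  · intro h; exact h.subset (List.mem_singleton_self a)
  · intro h; obtain ⟨s, t, rfl⟩ := List.append_of_mem h; exact ⟨s, t, by simp⟩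

theorem pvLastSl_lt (cs : List Char) : ∀ j, pvLastSl cs = some j → j < cs.length := by
  induction cs with
  | nil => intro j h; simp [pvLastSl] at h
  | cons c rest ih =>
      intro j h
      simp only [pvLastSl] at h
      cases hl : pvLastSl rest with
      | some k => rw [hl] at h; obtain rfl : k + 1 = j := by simpa using h
                  have := ih k hl; simp; omega
      | none => rw [hl] at h
                by_cases hc : c = '/' <;> simp [hc] at h <;> simp [← h]

theorem pvA_spec (cs : List Char) : pvGlobACore cs = pvSpec cs := by
  unfold pvGlobACore pvSpec
  rw [pvEnum_find cs 0]
  cases h : pvFirstWc cs with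
  | none =>
      simp only [Option.map_none, Option.getD_none, List.take_length,
        Option.bind_eq_bind, Option.bind_none]
      by_cases hm : '/' ∈ cs
      · rw [if_pos ((pvIsIn_singleton _ _).2 hm), pvRsplitHead_eq]
        have : pvLastSl cs ≠ none := by rw [ne_eq, pvLastSl_none_iff]; simpa using hm
        cases hl : pvLastSl cs with
        | none => exact absurd hl this
        | some j => simp
      · rw [if_neg (by rw [pvIsIn_singleton]; exact hm)]
        rw [(pvLastSl_none_iff cs).2 hm]
  | some k =>
      simp only [Option.map_some, Option.getD_some, zero_add,
        Option.bind_eq_bind, Option.bind_some, Option.pure_def]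
      rw [PySem.List.slice_to_natCast]
      by_cases hm : '/' ∈ cs.take k
      · rw [if_neg (by simp [pvIsIn_singleton, hm]), pvRsplitHead_eq]
        have : pvLastSl (cs.take k) ≠ none := by rw [ne_eq, pvLastSl_none_iff]; simpa using hm
        cases hl : pvLastSl (cs.take k) with
        | none => exact absurd hl this
        | some j =>
            simp only []
            rw [List.take_take]
            congr 1
            have hjk : j < k := by
              have h1 := pvLastSl_lt _ j hl
              have h2 := List.length_take_le k cs
              simp at h1
              omega
            omega
      · rw [if_pos (by simp [pvIsIn_singleton, hm])]
        rw [(pvLastSl_none_iff _).2 hm]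





def pvIdx (cs : List Char) : Nat :=
  ((pvSplitSl cs).findIdx? (fun part => part.any pvWc)).getD ((pvSplitSl cs).length - 1)

def pvCut (cs : List Char) : Nat := (pvFirstWc cs).getD cs.length

theorem pvWc_ne_slash {c : Char} (h : pvWc c = true) : c ≠ '/' := by
  rcases Bool.or_eq_true_iff.1 h with h' | h'
  · rcases Bool.or_eq_true_iff.1 h' with h'' | h'' <;>
      · intro e; subst e; simp at h''
  · intro e; subst e; simp at h'

theorem pvCut_wc {c : Char} (rest : List Char) (h : pvWc c = true) : pvCut (c :: rest) = 0 := by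
  simp [pvCut, pvFirstWc, h]

theorem pvCut_not_wc {c : Char} (rest : List Char) (h : pvWc c = false) :
    pvCut (c :: rest) = pvCut rest + 1 := by
  simp only [pvCut, pvFirstWc, h, Bool.false_eq_true, if_false]
  cases pvFirstWc rest <;> simp

theorem pvIdx_slash (rest : List Char) : pvIdx ('/' :: rest) = pvIdx rest + 1 := by
  have hne := pvSplitSl_ne_nil rest
  simp only [pvIdx, pvSplitSl, if_pos rfl, if_true, List.findIdx?_cons, List.any_nil,
    Bool.false_eq_true, if_false]
  cases h : (pvSplitSl rest).findIdx? (fun part => part.any pvWc) with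
  | some k => simp
  | none =>
      have hlen : 0 < (pvSplitSl rest).length := List.length_pos_iff.2 hne
      simp
      omega

theorem pvIdx_wc {c : Char} (rest : List Char) (hw : pvWc c = true) : pvIdx (c :: rest) = 0 := by
  have hc := pvWc_ne_slash hw
  cases hs : pvSplitSl rest with
  | nil => exact absurd hs (pvSplitSl_ne_nil rest)
  | cons p ps =>
      simp [pvIdx, pvSplitSl, hc, hs, List.findIdx?_cons, hw]

theorem pvIdx_plain {c : Char} (rest : List Char) (hc : c ≠ '/') (hw : pvWc c = false) :
    pvIdx (c :: rest) = pvIdx rest := by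
  cases hs : pvSplitSl rest with
  | nil => exact absurd hs (pvSplitSl_ne_nil rest)
  | cons p ps =>
      simp [pvIdx, pvSplitSl, hc, hs, List.findIdx?_cons, hw]

theorem pvIdx_zero_iff (cs : List Char) : pvIdx cs = 0 ↔ '/' ∉ cs.take (pvCut cs) := by
  induction cs with
  | nil => simp [pvIdx, pvSplitSl, pvCut, pvFirstWc]
  | cons c rest ih =>
      by_cases hw : pvWc c = true
      · simp [pvIdx_wc rest hw, pvCut_wc rest hw]
      · have hw' : pvWc c = false := by simpa using hw
        by_cases hc : c = '/'
        · subst hc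
          simp [pvIdx_slash rest, pvCut_not_wc rest hw', List.take_succ_cons]
        · simp only [pvIdx_plain rest hc hw', pvCut_not_wc rest hw', List.take_succ_cons,
            List.mem_cons, ih]
          constructor
          · intro h hm; rcases hm with e | hm
            · exact hc e.symm
            · exact h hm
          · intro h hm; exact h (Or.inr hm)

theorem pvJoin_cons (c : Char) (p : List Char) (t : List (List Char)) :
    PySem.Chars.join ['/'] ((c :: p) :: t) = c :: PySem.Chars.join ['/'] (p :: t) := by
  cases t with
  | nil => rw [PySem.Chars.join_singleton, PySem.Chars.join_singleton]
  | cons q u =>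
      rw [PySem.Chars.join_cons_cons, PySem.Chars.join_cons_cons]
      simp

def pvBVal (cs : List Char) : List Char :=
  PySem.Chars.join ['/'] ((pvSplitSl cs).take (pvIdx cs))

theorem pvSpec_eq (cs : List Char) :
    pvSpec cs = (match pvLastSl (cs.take (pvCut cs)) with | none => [] | some j => cs.take j) := rfl

theorem pvSpec_cons_wc {c : Char} (rest : List Char) (hw : pvWc c = true) :
    pvSpec (c :: rest) = [] := by
  rw [pvSpec_eq, pvCut_wc rest hw]
  simp [pvLastSl]

theorem pvSpec_cons_slash (rest : List Char) :
    pvSpec ('/' :: rest)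
      = (match pvLastSl (rest.take (pvCut rest)) with
         | none => [] | some k => '/' :: rest.take k) := by
  rw [pvSpec_eq, pvCut_not_wc rest (by decide), List.take_succ_cons]
  simp only [pvLastSl]
  cases pvLastSl (rest.take (pvCut rest)) <;> simp

theorem pvSpec_cons_plain {c : Char} (rest : List Char) (hc : c ≠ '/') (hw : pvWc c = false) :
    pvSpec (c :: rest)
      = (match pvLastSl (rest.take (pvCut rest)) with
         | none => [] | some k => c :: rest.take k) := by
  rw [pvSpec_eq, pvCut_not_wc rest hw, List.take_succ_cons]
  simp only [pvLastSl]
  cases pvLastSl (rest.take (pvCut rest)) <;> simp [hc]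

theorem pvB_spec (cs : List Char) : pvBVal cs = pvSpec cs := by
  induction cs with
  | nil => decide
  | cons c rest ih =>
      by_cases hw : pvWc c = true
      · rw [pvSpec_cons_wc rest hw]
        simp [pvBVal, pvIdx_wc rest hw]
      · have hw' : pvWc c = false := by simpa using hw
        by_cases hc : c = '/'
        · subst hc
          have hsp : pvSplitSl ('/' :: rest) = [] :: pvSplitSl rest := by simp [pvSplitSl]
          rw [pvSpec_cons_slash rest]
          simp only [pvBVal, pvIdx_slash rest, hsp, List.take_succ_cons]
          cases hT : (pvSplitSl rest).take (pvIdx rest) with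
          | nil =>
              have hz : pvIdx rest = 0 := by
                rcases List.take_eq_nil_iff.1 hT with h | h
                · exact h
                · exact absurd h (pvSplitSl_ne_nil rest)
              have hl : pvLastSl (rest.take (pvCut rest)) = none :=
                (pvLastSl_none_iff _).2 ((pvIdx_zero_iff rest).1 hz)
              rw [hl, PySem.Chars.join_singleton]
          | cons q t =>
              have hz : pvIdx rest ≠ 0 := by
                intro h0; rw [h0] at hT; simp at hT
              have hl : pvLastSl (rest.take (pvCut rest)) ≠ none := by
                rw [ne_eq, pvLastSl_none_iff]
                intro hns
                exact hz ((pvIdx_zero_iff rest).2 hns)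
              have hjoin : PySem.Chars.join ['/'] (q :: t) = pvSpec rest := by
                rw [← hT]; exact ih
              cases hlk : pvLastSl (rest.take (pvCut rest)) with
              | none => exact absurd hlk hl
              | some k =>
                  rw [PySem.Chars.join_cons_cons, hjoin, pvSpec_eq, hlk]
                  simp
        · have hsp : ∃ p ps, pvSplitSl rest = p :: ps := by
            cases hs : pvSplitSl rest with
            | nil => exact absurd hs (pvSplitSl_ne_nil rest)
            | cons p ps => exact ⟨p, ps, rfl⟩
          obtain ⟨p, ps, hs⟩ := hsp
          have hsp2 : pvSplitSl (c :: rest) = (c :: p) :: ps := by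
            simp [pvSplitSl, hc, hs]
          rw [pvSpec_cons_plain rest hc hw']
          simp only [pvBVal, pvIdx_plain rest hc hw', hsp2]
          cases hz : pvIdx rest with
          | zero =>
              have hl : pvLastSl (rest.take (pvCut rest)) = none :=
                (pvLastSl_none_iff _).2 ((pvIdx_zero_iff rest).1 hz)
              rw [hl]
              simp
          | succ k =>
              have hl : pvLastSl (rest.take (pvCut rest)) ≠ none := by
                rw [ne_eq, pvLastSl_none_iff]
                intro hns
                rw [(pvIdx_zero_iff rest).2 hns] at hz
                exact Nat.succ_ne_zero k hz.symm
              cases hlk : pvLastSl (rest.take (pvCut rest)) with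
              | none => exact absurd hlk hl
              | some j =>
                  rw [List.take_succ_cons, pvJoin_cons]
                  have : (p :: List.take k ps) = (pvSplitSl rest).take (pvIdx rest) := by
                    rw [hs, hz, List.take_succ_cons]
                  rw [this]
                  have hjoin : PySem.Chars.join ['/'] ((pvSplitSl rest).take (pvIdx rest)) = pvSpec rest := ih
                  rw [hjoin, pvSpec_eq, hlk]

theorem pvCore_eq (cs : List Char) : pvGlobACore cs = pvGlobBCore cs := by
  rw [pvA_spec, pvGlobBCore]
  simp only [pvSplitOn_eq]
  exact (pvB_spec cs).symm

-- ===== VERDICT (by name: the statement is the Claim_ definition above) =====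
theorem glob_search_root_py_spec : Claim_equal_glob_search_root_py := by
  intro pattern _
  unfold Spec_glob_search_root_py glob_search_root_py glob_search_root_py_alt
  rw [pvCore_eq]
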